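-- pv_equiv track=rewrite | github.com/Wanke15/ImageCaption-Keras | utils.py | clean_descriptions
-- ===== SOURCE A (Python) =====
-- import string
--
-- def clean_descriptions(descs):
--     # prepare translation table for removing punctuation
--     table = str.maketrans('', '', string.punctuation)
--     for key, desc_list in descs.items():
--         for i in range(len(desc_list)):
--             desc = desc_list[i]
--             # tokenize
--             desc = desc.split()
--             # convert to lower case
--             desc = [word.lower() for word in desc]
--             # remove punctuation from each token
--             desc = [w.translate(table) for w in desc]
--             # remove hanging 's' and 'a'
--             desc = [word for word in desc if len(word) > 1]
--             # remove tokens with numbers in them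
--             desc = [word for word in desc if word.isalpha()]
--             # store as string
--             desc_list[i] = ' '.join(desc)
--     return descs
-- ===== SOURCE B (Python) =====
-- import string
--
-- def clean_descriptions(descs):
--     # Character-level streaming state machine: one scan over each raw caption,
--     # no split()/join-of-stages. Tokens are flushed at whitespace; punctuation is
--     # skipped char by char, lowered letters are accumulated, any other char marks
--     # the current token bad. Builds a fresh dict; return value identical to A's.
--     punct = frozenset(string.punctuation)
--
--     def clean(s):
--         pieces = []
--         cur = []
--         bad = False
--         for c in s:
--             if c.isspace():
--                 if not bad and len(cur) > 1:
--                     pieces.append(''.join(cur))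
--                 cur = []
--                 bad = False
--             else:
--                 w = c.lower()
--                 if w in punct:
--                     continue
--                 elif w.isalpha():
--                     cur.append(w)
--                 else:
--                     bad = True
--         if not bad and len(cur) > 1:
--             pieces.append(''.join(cur))
--         return ' '.join(pieces)
--
--     return {k: [clean(s) for s in v] for k, v in descs.items()}
-- ===== Notes on version B (the rewrite author's own statement) =====
-- stated objective: alternative
-- what changed: Replaces A's split()-then-four-staged-list-comprehensions pipeline with a single character-level state machine per caption: one scan over the raw string that flushes tokens at whitespace, skips punctuation char by char, accumulates lowered letters and drops a token via a bad-flag when a non-alpha char appears; builds a fresh dict instead of mutating in place (return value identical).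
import Mathlib
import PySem

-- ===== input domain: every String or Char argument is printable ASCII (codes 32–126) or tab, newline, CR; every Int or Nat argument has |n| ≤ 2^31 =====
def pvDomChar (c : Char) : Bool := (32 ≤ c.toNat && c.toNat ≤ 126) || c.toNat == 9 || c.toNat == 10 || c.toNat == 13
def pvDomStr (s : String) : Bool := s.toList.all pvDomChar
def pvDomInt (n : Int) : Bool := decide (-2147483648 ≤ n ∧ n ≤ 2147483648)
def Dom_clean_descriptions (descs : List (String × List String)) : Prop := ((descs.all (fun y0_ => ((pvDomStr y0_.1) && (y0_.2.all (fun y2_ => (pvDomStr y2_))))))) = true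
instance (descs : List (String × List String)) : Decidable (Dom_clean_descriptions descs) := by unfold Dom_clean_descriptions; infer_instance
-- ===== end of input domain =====

-- B replaces A's split()-then-four-staged-comprehensions pipeline with a single character-level
-- state machine per caption (objective: alternative). A mutates the input dict's lists in place
-- and returns it; B builds a fresh dict — the equivalence proved here is about the RETURN value only.

-- string.punctuation
def pvPunct : List Char := "!\"#$%&'()*+,-./:;<=>?@[\\]^_`{|}~".toList

-- ===== PORT A =====
-- str.translate with a table deleting string.punctuation (and mapping nothing else): exact as a
-- filter removing exactly those characters.
def pvCleanA (s : String) : String :=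
  let d0 := PySem.Chars.split₀ s.toList
  let d1 := d0.map PySem.Chars.lower
  let d2 := d1.map (fun w => w.filter (fun c => !(pvPunct.contains c)))
  let d3 := d2.filter (fun w => decide (1 < w.length))
  let d4 := d3.filter PySem.Chars.strIsalpha
  String.mk (PySem.Chars.join [' '] d4)

def clean_descriptions (descs : List (String × List String)) : List (String × List String) :=
  descs.map (fun kv => (kv.1, kv.2.map pvCleanA))

-- ===== PORT B =====
-- the loop body of Source B's clean(): state (pieces, cur, bad), flushed at whitespace and at the end
def pvGoB : List Char → List (List Char) → List Char → Bool → List (List Char)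
  | [], pieces, cur, bad =>
      if !bad && decide (1 < cur.length) then pieces ++ [cur] else pieces
  | c :: rest, pieces, cur, bad =>
      if PySem.Chars.isspace c then
        pvGoB rest (if !bad && decide (1 < cur.length) then pieces ++ [cur] else pieces) [] false
      else
        let w := PySem.Chars.lowerChar c
        if pvPunct.contains w then pvGoB rest pieces cur bad
        else if PySem.Chars.isalpha w then pvGoB rest pieces (cur ++ [w]) bad
        else pvGoB rest pieces cur true

def pvCleanB (s : String) : String :=
  String.mk (PySem.Chars.join [' '] (pvGoB s.toList [] [] false))

def clean_descriptions_alt (descs : List (String × List String)) : List (String × List String) :=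
  descs.map (fun kv => (kv.1, kv.2.map pvCleanB))

-- ===== PRECONDITION & SPEC =====
def Spec_clean_descriptions (descs : List (String × List String)) (out : List (String × List String)) : Prop := out = clean_descriptions_alt descs
instance (descs : List (String × List String)) (out : List (String × List String)) : Decidable (Spec_clean_descriptions descs out) := by unfold Spec_clean_descriptions; infer_instance

-- ===== CLAIM (what is proved, stated in full; the proofs are below) =====
def Claim_equal_clean_descriptions : Prop := ∀ (descs : List (String × List String)), Dom_clean_descriptions descs → Spec_clean_descriptions descs (clean_descriptions descs)

-- ===== LEMMAS AND PROOFS =====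

-- A's per-token cleaning (lower then remove punctuation), and its whole token pipeline
def pvTok (w : List Char) : List Char :=
  (PySem.Chars.lower w).filter (fun c => !(pvPunct.contains c))

def pvPipe (ts : List (List Char)) : List (List Char) :=
  ((ts.map pvTok).filter (fun w => decide (1 < w.length))).filter PySem.Chars.strIsalpha

theorem pvPipe_append (ts us : List (List Char)) : pvPipe (ts ++ us) = pvPipe ts ++ pvPipe us := by
  simp [pvPipe]

theorem pvTok_snoc (raw : List Char) (c : Char) :
    pvTok (raw ++ [c]) =
      pvTok raw ++ (if pvPunct.contains (PySem.Chars.lowerChar c) then [] else [PySem.Chars.lowerChar c]) := by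
  simp [pvTok, PySem.Chars.lower]
  split_ifs with h <;> simp [h]

theorem split₀_go_acc (cs : List Char) (cur : List Char) (acc : List (List Char)) :
    PySem.Chars.split₀.go cs cur acc = acc.reverse ++ PySem.Chars.split₀.go cs cur [] := by
  induction cs generalizing cur acc with
  | nil => simp [PySem.Chars.split₀.go]; split_ifs <;> simp
  | cons c rest ih =>
    simp only [PySem.Chars.split₀.go]
    split_ifs with h1 h2
    · exact ih _ _
    · rw [ih _ (cur.reverse :: acc), ih _ [cur.reverse]]; simp
    · exact ih _ _

-- the single flush step of B equals running A's pipeline on the one raw token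
theorem pvFlush_eq (pieces : List (List Char)) (raw cur : List Char) (bad : Bool)
    (hcur : bad = false → cur = pvTok raw ∧ (pvTok raw).all PySem.Chars.isalpha = true)
    (hbad : bad = true → (pvTok raw).all PySem.Chars.isalpha = false) :
    (if !bad && decide (1 < cur.length) then pieces ++ [cur] else pieces) =
      pieces ++ pvPipe (if raw.isEmpty then [] else [raw]) := by
  cases bad with
  | true =>
    have h := hbad rfl
    have hraw : raw.isEmpty = false := by
      cases hr : raw.isEmpty
      · rfl
      · have : raw = [] := by simpa using hr
        subst this
        simp [pvTok, PySem.Chars.lower] at h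
    by_cases hl : 1 < (pvTok raw).length
    · simp [hraw, pvPipe, PySem.Chars.strIsalpha, h, hl]
    · simp [hraw, pvPipe, hl]
  | false =>
    obtain ⟨hc, ha⟩ := hcur rfl
    subst hc
    cases hraw : raw.isEmpty with
    | true =>
      have : raw = [] := by simpa using hraw
      subst this
      simp [pvTok, PySem.Chars.lower, pvPipe]
    | false =>
      by_cases hl : 1 < (pvTok raw).length
      · have hne : (pvTok raw).isEmpty = false := by
          cases h : pvTok raw <;> simp_all
        simp [hl, pvPipe, PySem.Chars.strIsalpha, hne, ha]
      · simp [hl, pvPipe]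

-- main invariant: B's state machine computes A's pipeline over split₀'s remaining tokens
theorem pvGoB_eq (cs : List Char) (raw : List Char) (pieces : List (List Char)) (cur : List Char) (bad : Bool)
    (hcur : bad = false → cur = pvTok raw ∧ (pvTok raw).all PySem.Chars.isalpha = true)
    (hbad : bad = true → (pvTok raw).all PySem.Chars.isalpha = false) :
    pvGoB cs pieces cur bad = pieces ++ pvPipe (PySem.Chars.split₀.go cs raw.reverse []) := by
  induction cs generalizing raw pieces cur bad with
  | nil =>
    simp only [pvGoB, PySem.Chars.split₀.go, List.isEmpty_reverse, List.reverse_reverse]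
    rw [pvFlush_eq pieces raw cur bad hcur hbad]
    cases h : raw.isEmpty <;> simp
  | cons c rest ih =>
    simp only [pvGoB, PySem.Chars.split₀.go]
    by_cases hs : PySem.Chars.isspace c = true
    · simp only [hs, if_true, List.isEmpty_reverse, List.reverse_reverse]
      have hstep := ih ([]) (if !bad && decide (1 < cur.length) then pieces ++ [cur] else pieces) [] false
        (fun _ => ⟨by simp [pvTok, PySem.Chars.lower], by simp [pvTok, PySem.Chars.lower]⟩)
        (fun h => by simp at h)
      simp only [List.reverse_nil] at hstep
      cases raw with
      | nil =>
        rw [if_pos List.isEmpty_nil, hstep, pvFlush_eq pieces [] cur bad hcur hbad]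
        simp [pvPipe]
      | cons a as =>
        rw [if_neg (show ¬((a :: as).isEmpty = true) by simp), split₀_go_acc rest [] _, hstep,
            pvFlush_eq pieces (a :: as) cur bad hcur hbad]
        simp [← pvPipe_append]
    · rw [if_neg hs, if_neg hs]
      have hrev : c :: raw.reverse = (raw ++ [c]).reverse := by simp
      rw [hrev]
      by_cases hp : pvPunct.contains (PySem.Chars.lowerChar c) = true
      · simp only [hp, if_true]
        exact ih (raw ++ [c]) pieces cur bad
          (fun h => by rw [pvTok_snoc]; simp only [hp, if_true, List.append_nil]; exact hcur h)
          (fun h => by rw [pvTok_snoc]; simp only [hp, if_true, List.append_nil]; exact hbad h)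
      · simp only [Bool.not_eq_true] at hp
        rw [if_neg (by simpa using hp)]
        by_cases hA : PySem.Chars.isalpha (PySem.Chars.lowerChar c) = true
        · rw [if_pos hA]
          exact ih (raw ++ [c]) pieces (cur ++ [PySem.Chars.lowerChar c]) bad
            (fun h => by
              obtain ⟨hc1, hc2⟩ := hcur h
              rw [pvTok_snoc, if_neg (by simpa using hp)]
              simp [hc1, hc2, hA])
            (fun h => by rw [pvTok_snoc, if_neg (by simpa using hp)]; simp [hbad h])
        · rw [if_neg hA]
          exact ih (raw ++ [c]) pieces cur true
            (fun h => by simp at h)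
            (fun _ => by rw [pvTok_snoc, if_neg (by simpa using hp)]; simp [hA])

theorem pvCleanB_eq_pvCleanA (s : String) : pvCleanB s = pvCleanA s := by
  unfold pvCleanB pvCleanA
  have h := pvGoB_eq s.toList [] [] [] false
      (fun _ => ⟨by simp [pvTok, PySem.Chars.lower], by simp [pvTok, PySem.Chars.lower]⟩)
      (fun h => by simp at h)
  simp only [List.reverse_nil, List.nil_append] at h
  rw [h, show PySem.Chars.split₀.go s.toList [] [] = PySem.Chars.split₀ s.toList from rfl]
  have hT : pvTok = ((fun w => List.filter (fun c => !decide (c ∈ pvPunct)) w) ∘ PySem.Chars.lower) := by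
    funext w
    simp [pvTok, List.contains_eq_mem]
  simp [pvPipe, hT, List.map_map]

-- ===== VERDICT (by name: the statement is the Claim_ definition above) =====
theorem clean_descriptions_spec : Claim_equal_clean_descriptions := by
  intro descs _
  unfold Spec_clean_descriptions clean_descriptions clean_descriptions_alt
  simp [pvCleanB_eq_pvCleanA]
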